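-- pv_equiv track=rewrite | github.com/PearTNhat/SynFlood_Detection | utils.py | portsum
-- ===== SOURCE A (Python) =====
-- def portsum(x):
--     total_ports=[]
--     result=[]
--     for i in x:
--         if i not in total_ports:
--             total_ports.append(i)
--         result.append(len(total_ports))
--     return result
-- ===== SOURCE B (Python) =====
-- from itertools import accumulate
--
-- def portsum(x):
--     seen = []
--     flags = []
--     for i in x:
--         if i in seen:
--             flags.append(0)
--         else:
--             seen.append(i)
--             flags.append(1)
--     return list(accumulate(flags))
-- ===== Notes on version B (the rewrite author's own statement) =====
-- stated objective: alternative
-- what changed: B separates the work into two phases: build a 0/1 first-occurrence indicator list, then return its running prefix sums (itertools.accumulate), instead of A's single loop appending the current length of the seen-list.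
import Mathlib
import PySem

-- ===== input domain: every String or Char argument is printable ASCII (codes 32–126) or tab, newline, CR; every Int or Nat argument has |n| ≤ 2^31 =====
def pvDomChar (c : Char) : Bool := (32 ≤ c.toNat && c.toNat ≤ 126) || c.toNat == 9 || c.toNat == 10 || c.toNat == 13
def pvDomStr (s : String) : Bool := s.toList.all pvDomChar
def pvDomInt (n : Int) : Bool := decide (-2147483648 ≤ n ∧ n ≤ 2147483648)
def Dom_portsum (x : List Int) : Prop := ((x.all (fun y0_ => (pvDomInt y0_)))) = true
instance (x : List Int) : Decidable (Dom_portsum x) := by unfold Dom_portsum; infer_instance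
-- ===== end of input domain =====

-- B rewrites A as two phases (first-occurrence indicator list, then running prefix sums); alternative decomposition, same cost.

-- ===== PORT A =====
-- A's single loop: maintain total_ports and append its length to result at each step.
def portsumGo (xs : List Int) (totalPorts : List Int) (result : List Int) : List Int :=
  match xs with
  | [] => result
  | i :: rest =>
      let tp := if i ∈ totalPorts then totalPorts else totalPorts ++ [i]
      portsumGo rest tp (result ++ [(tp.length : Int)])

def portsum (x : List Int) : List Int := portsumGo x [] []

-- ===== PORT B =====
-- Phase 1: build the 0/1 indicator list (1 iff first occurrence), maintaining seen.
def flagsGo (xs : List Int) (seen : List Int) : List Int :=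
  match xs with
  | [] => []
  | i :: rest =>
      if i ∈ seen then (0 : Int) :: flagsGo rest seen
      else (1 : Int) :: flagsGo rest (seen ++ [i])

-- Phase 2: itertools.accumulate — running prefix sums.
def accumGo (acc : Int) (fs : List Int) : List Int :=
  match fs with
  | [] => []
  | f :: rest => (acc + f) :: accumGo (acc + f) rest

def portsum_alt (x : List Int) : List Int := accumGo 0 (flagsGo x [])

-- ===== PRECONDITION & SPEC =====
def Spec_portsum (x : List Int) (out : List Int) : Prop := out = portsum_alt x
instance (x : List Int) (out : List Int) : Decidable (Spec_portsum x out) := by unfold Spec_portsum; infer_instance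

-- ===== CLAIM (what is proved, stated in full; the proofs are below) =====
def Claim_equal_portsum : Prop := ∀ (x : List Int), Dom_portsum x → Spec_portsum x (portsum x)

-- ===== LEMMAS AND PROOFS =====
theorem portsumGo_eq (xs : List Int) : ∀ (seen res : List Int),
    portsumGo xs seen res = res ++ accumGo (seen.length : Int) (flagsGo xs seen) := by
  induction xs with
  | nil => intro seen res; simp [portsumGo, flagsGo, accumGo]
  | cons i rest ih =>
      intro seen res
      by_cases h : i ∈ seen
      · rw [portsumGo, flagsGo]
        simp only [h, if_true]
        rw [ih seen (res ++ [(seen.length : Int)]), accumGo]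
        simp
      · rw [portsumGo, flagsGo]
        simp only [h, if_false]
        rw [ih (seen ++ [i]) (res ++ [((seen ++ [i]).length : Int)]), accumGo]
        simp

-- ===== VERDICT (by name: the statement is the Claim_ definition above) =====
theorem portsum_spec : Claim_equal_portsum := by
  intro x _
  unfold Spec_portsum portsum portsum_alt
  simpa using portsumGo_eq x [] []
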